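-- pv_equiv track=rewrite | github.com/AlexKirkup90/running_app | core/services/planning.py | _normalize_preferred_days
-- ===== SOURCE A (Python) =====
-- from typing import Optional
--
-- DAY_TO_INDEX = {"Mon": 0, "Tue": 1, "Wed": 2, "Thu": 3, "Fri": 4, "Sat": 5, "Sun": 6}
--
-- def _normalize_preferred_days(preferred_days: Optional[list[str]]) -> list[int]:
--     if not preferred_days:
--         return []
--     seen: set[int] = set()
--     order: list[int] = []
--     for day in preferred_days:
--         key = str(day or "").strip()[:3].title()
--         idx = DAY_TO_INDEX.get(key)
--         if idx is None or idx in seen: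
--             continue
--         seen.add(idx)
--         order.append(idx)
--     return order
-- ===== SOURCE B (Python) =====
-- from typing import Optional
--
-- DAY_TO_INDEX = {"Mon": 0, "Tue": 1, "Wed": 2, "Thu": 3, "Fri": 4, "Sat": 5, "Sun": 6}
--
-- def _nub(xs):
--     # classical filter-nub: keep the head, delete every later copy of it, recurse
--     if not xs:
--         return []
--     return [xs[0]] + _nub([x for x in xs[1:] if x != xs[0]])
--
-- def _normalize_preferred_days(preferred_days):
--     if not preferred_days:
--         return []
--     idxs = [i for i in (DAY_TO_INDEX.get(str(day or "").strip()[:3].title())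
--                         for day in preferred_days) if i is not None]
--     return _nub(idxs)
-- ===== Notes on version B (the rewrite author's own statement) =====
-- stated objective: alternative
-- what changed: A's single streaming pass with a seen-set and membership branch is replaced by a map/filter pass to indices followed by a recursive filter-nub that deduplicates by deleting later copies of each head from the remainder, maintaining no auxiliary structure.
import Mathlib
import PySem

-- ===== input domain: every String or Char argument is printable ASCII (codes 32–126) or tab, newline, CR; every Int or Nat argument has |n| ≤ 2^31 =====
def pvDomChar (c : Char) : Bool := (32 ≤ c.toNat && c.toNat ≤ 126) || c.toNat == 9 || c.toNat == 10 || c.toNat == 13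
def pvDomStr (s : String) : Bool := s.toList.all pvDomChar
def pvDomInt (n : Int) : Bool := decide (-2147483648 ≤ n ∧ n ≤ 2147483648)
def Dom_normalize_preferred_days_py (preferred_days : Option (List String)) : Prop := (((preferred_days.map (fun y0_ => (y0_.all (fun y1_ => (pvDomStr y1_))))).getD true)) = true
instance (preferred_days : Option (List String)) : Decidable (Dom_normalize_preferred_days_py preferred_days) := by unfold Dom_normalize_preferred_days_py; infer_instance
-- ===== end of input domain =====

-- B replaces A's seen-set streaming dedup by a map/filter pass plus a recursive filter-nub (alternative decomposition; return value proved equal).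


-- ===== PORT A =====
-- shared helper: the normalization expression `DAY_TO_INDEX.get(str(day or "").strip()[:3].title())`
-- is byte-identical in A and B, so both ports use the same helper.
-- Python str.title(), hand-ported (exact on ASCII, where "cased" = isalpha): a letter after a
-- non-letter is uppercased, a letter after a letter is lowercased, other chars pass through.
def pyTitle (cs : List Char) : List Char :=
  (cs.foldl (fun (st : List Char × Bool) c =>
      if PySem.Chars.isalpha c then
        (st.1 ++ [if st.2 then PySem.Chars.lowerChar c else PySem.Chars.upperChar c], true)
      else (st.1 ++ [c], false)) ([], false)).1

def DAY_TO_INDEX : PySem.Dict String Int :=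
  PySem.Dict.mk [("Mon", 0), ("Tue", 1), ("Wed", 2), ("Thu", 3), ("Fri", 4), ("Sat", 5), ("Sun", 6)]

-- DAY_TO_INDEX.get(str(day or "").strip()[:3].title())
def dayIdx? (day : String) : Option Int :=
  let d := if day = "" then "" else day
  DAY_TO_INDEX.get? (String.ofList (pyTitle (PySem.List.slice (PySem.Chars.strip d.toList) none (some 3))))

def normalize_preferred_days_py (preferred_days : Option (List String)) : List Int :=
  match preferred_days with
  | none => []
  | some days =>
    if days = [] then []
    else
      (days.foldl (fun (st : PySem.Set Int × List Int) day =>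
          match dayIdx? day with
          | none => st
          | some idx =>
            if PySem.Set.contains st.1 idx then st
            else (PySem.Set.add st.1 idx, st.2 ++ [idx]))
        (PySem.Set.empty, [])).2

-- ===== PORT B =====
-- _nub: keep the head, delete every later copy of it from the tail, recurse.
def pvNub : List Int → List Int
  | [] => []
  | x :: xs => x :: pvNub (xs.filter (· != x))
termination_by l => l.length
decreasing_by
  simp only [List.length_cons, List.length_unattach]
  exact Nat.lt_succ_of_le (le_trans (List.length_filter_le _ _) (le_of_eq List.length_attach))

def normalize_preferred_days_py_alt (preferred_days : Option (List String)) : List Int :=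
  match preferred_days with
  | none => []
  | some days =>
    if days = [] then []
    else
      pvNub ((days.map dayIdx?).filterMap id)

-- ===== PRECONDITION & SPEC =====
def Spec_normalize_preferred_days_py (preferred_days : Option (List String)) (out : List Int) : Prop := out = normalize_preferred_days_py_alt preferred_days
instance (preferred_days : Option (List String)) (out : List Int) : Decidable (Spec_normalize_preferred_days_py preferred_days out) := by unfold Spec_normalize_preferred_days_py; infer_instance

-- ===== CLAIM (what is proved, stated in full; the proofs are below) =====
def Claim_equal_normalize_preferred_days_py : Prop := ∀ (preferred_days : Option (List String)), Dom_normalize_preferred_days_py preferred_days → Spec_normalize_preferred_days_py preferred_days (normalize_preferred_days_py preferred_days)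

-- ===== LEMMAS AND PROOFS =====

-- unfolding equations of the well-founded pvNub
theorem pvNub_nil : pvNub [] = [] := by simp [pvNub]
theorem pvNub_cons (x : Int) (xs : List Int) :
    pvNub (x :: xs) = x :: pvNub (xs.filter (· != x)) := by simp [pvNub]

-- In A's loop, `seen` and `order` always hold the same elements in the same sequence
-- (Set.add appends exactly when `order` appends), so the state is (s, s) and each step is Set.add.
theorem loopA_eq_foldl_add (days : List String) (s : PySem.Set Int) :
    (days.foldl (fun (st : PySem.Set Int × List Int) day =>
        match dayIdx? day with
        | none => st
        | some idx =>
          if PySem.Set.contains st.1 idx then st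
          else (PySem.Set.add st.1 idx, st.2 ++ [idx]))
      (s, s)).2
    = (days.filterMap dayIdx?).foldl PySem.Set.add s := by
  induction days generalizing s with
  | nil => rfl
  | cons d rest ih =>
    simp only [List.foldl_cons, List.filterMap_cons]
    cases h : dayIdx? d with
    | none => simpa [h] using ih s
    | some idx =>
      by_cases hm : idx ∈ s
      · simpa [h, hm, PySem.Set.add_of_mem hm] using ih s
      · simpa [h, hm, PySem.Set.add_of_not_mem hm] using ih (s ++ [idx])

-- The invariant connecting the accumulator-fold dedup with the filter-nub recursion.
theorem foldl_add_eq_nub_filter (L : List Int) (s : PySem.Set Int) :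
    L.foldl PySem.Set.add s = s ++ pvNub (L.filter (fun x => !s.contains x)) := by
  induction hL : L.length using Nat.strong_induction_on generalizing L s with
  | _ n ih =>
    cases L with
    | nil => simp [pvNub_nil]
    | cons x xs =>
      subst hL
      simp only [List.foldl_cons, List.filter_cons]
      by_cases hm : x ∈ s
      · have hc : s.contains x = true := by simpa using hm
        rw [PySem.Set.add_of_mem hm]
        simp only [hc, Bool.not_true, Bool.false_eq_true, if_false]
        exact ih xs.length (by simp) xs s rfl
      · have hc : s.contains x = false := by simpa using hm
        rw [PySem.Set.add_of_not_mem hm]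
        simp only [hc, Bool.not_false, if_true]
        rw [ih xs.length (by simp) xs (s ++ [x]) rfl]
        rw [pvNub_cons]
        have hfilt : xs.filter (fun y => !(s ++ [x]).contains y)
            = (xs.filter (fun y => !s.contains y)).filter (· != x) := by
          rw [List.filter_filter]
          apply List.filter_congr
          intro y _
          simp only [PySem.Set.contains, List.contains_append, List.contains_cons, List.contains_nil,
            Bool.or_false, Bool.not_or]
          cases hyx : (y == x) <;> cases hys : s.contains y <;> simp_all [Bool.and_comm]
        rw [hfilt]
        rw [List.append_assoc, List.singleton_append]

-- ===== VERDICT (by name: the statement is the Claim_ definition above) =====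
theorem normalize_preferred_days_py_spec : Claim_equal_normalize_preferred_days_py := by
  intro pd _
  unfold Spec_normalize_preferred_days_py normalize_preferred_days_py normalize_preferred_days_py_alt
  cases pd with
  | none => rfl
  | some days =>
    by_cases h : days = []
    · simp [h]
    · simp only [h, if_false]
      rw [show (PySem.Set.empty, ([] : List Int)) = ((([] : PySem.Set Int)), ([] : List Int)) from rfl,
        loopA_eq_foldl_add days ([] : PySem.Set Int)]
      rw [List.filterMap_map, Function.id_comp]
      rw [foldl_add_eq_nub_filter]
      simp
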